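-- pv_equiv track=rewrite | github.com/liyunrui/ner_project_for_detecting_attributes | py_feature/tokens_context.py | make_word_idx
-- ===== SOURCE A (Python) =====
-- from collections import Counter # for statistical features
--
-- def make_word_idx(item_names):
--     '''
--     It's a helper function for encode_text.
--
--     Return a dict including count of each token happening in the whole dataset.
--
--     parameters:
--     ------------
--     item_names: list, including all tokens in the complete dataset
--
--
--     '''
--     words = [word.lower() for word in item_names]
--     word_counts = Counter(words)
--
--     max_id = 1
--
--     word_idx = {}
--     for word, count in word_counts.items():
--         if count < 3:
--             word_idx[word] = 0
--         else:
--             word_idx[word] = max_id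
--             max_id += 1
--
--     return word_idx
-- ===== SOURCE B (Python) =====
-- def make_word_idx(item_names):
--     words = [word.lower() for word in item_names]
--     ws = sorted(words)
--     # a word occurs >= 3 times iff some position of the sorted list repeats two slots later
--     big = {ws[i] for i in range(len(ws) - 2) if ws[i] == ws[i + 2]}
--     distinct = list(dict.fromkeys(words))
--     freq = [w for w in distinct if w in big]
--     rank = {w: i + 1 for i, w in enumerate(freq)}
--     return {w: rank.get(w, 0) for w in distinct}
-- ===== Notes on version B (the rewrite author's own statement) =====
-- stated objective: alternative
-- what changed: B never counts occurrences: it sorts the lowered tokens and detects a frequent word by the offset test ws[i] == ws[i+2] on the sorted list, then assigns ids from each word's position in the frequent list via an enumerate-built rank table, instead of A's Counter plus a running max_id loop.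
import Mathlib
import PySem

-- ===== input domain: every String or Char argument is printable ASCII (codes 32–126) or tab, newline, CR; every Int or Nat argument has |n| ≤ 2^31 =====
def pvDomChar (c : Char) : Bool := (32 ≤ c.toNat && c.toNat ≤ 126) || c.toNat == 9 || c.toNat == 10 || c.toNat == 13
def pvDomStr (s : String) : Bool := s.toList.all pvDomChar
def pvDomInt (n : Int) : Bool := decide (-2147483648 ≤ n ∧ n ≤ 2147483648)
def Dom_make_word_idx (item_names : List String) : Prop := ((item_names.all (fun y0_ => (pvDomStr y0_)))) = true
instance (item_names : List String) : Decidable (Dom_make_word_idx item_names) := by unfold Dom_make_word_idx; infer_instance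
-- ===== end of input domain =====

-- B never counts: it sorts the lowered tokens and detects frequent words by the
-- offset test ws[i] == ws[i+2]; ids are each word's position in the frequent list,
-- read from a rank table (alternative algorithm, similar cost).

-- ===== PORT A =====
def make_word_idx (item_names : List String) : List (String × Int) :=
  let words := item_names.map (fun word => PySem.Str.lower word)
  let word_counts := PySem.Dict.counter words
  let st := word_counts.items.foldl
    (fun (st : PySem.Dict String Int × Int) p =>
      if p.2 < 3 then (st.1.insert p.1 0, st.2)
      else (st.1.insert p.1 st.2, st.2 + 1))
    (PySem.Dict.empty, 1)
  st.1.items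

-- ===== PORT B =====
def make_word_idx_alt (item_names : List String) : List (String × Int) :=
  let words := item_names.map (fun word => PySem.Str.lower word)
  let ws := PySem.List.sorted words (fun x => x) false
  -- set comprehension over range(len(ws)-2); every index is in range, so the
  -- pyGetD default "" is never read (exact for ws[i])
  let big := PySem.Set.ofList
    (((PySem.List.pyRange 0 ((ws.length : Int) - 2) 1).filter
        (fun i => PySem.List.pyGetD ws i "" == PySem.List.pyGetD ws (i + 2) "")).map
      (fun i => PySem.List.pyGetD ws i ""))
  let distinct := PySem.List.dedup words           -- list(dict.fromkeys(words))
  let freq := distinct.filter (fun w => PySem.Set.contains big w)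
  let rank := (PySem.List.enumerate freq 0).foldl
    (fun (d : PySem.Dict String Int) p => d.insert p.2 (p.1 + 1)) PySem.Dict.empty
  (distinct.foldl (fun (d : PySem.Dict String Int) w => d.insert w (rank.getD w 0))
    PySem.Dict.empty).items

-- ===== PRECONDITION & SPEC =====
def Spec_make_word_idx (item_names : List String) (out : List (String × Int)) : Prop := out = make_word_idx_alt item_names
instance (item_names : List String) (out : List (String × Int)) : Decidable (Spec_make_word_idx item_names out) := by unfold Spec_make_word_idx; infer_instance

-- ===== CLAIM (what is proved, stated in full; the proofs are below) =====
def Claim_equal_make_word_idx : Prop := ∀ (item_names : List String), Dom_make_word_idx item_names → Spec_make_word_idx item_names (make_word_idx item_names)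

-- ===== LEMMAS AND PROOFS =====

-- A's loop body as a structural function on the counter's items, threading max_id.
def pvA : List (String × Int) → Int → List (String × Int)
  | [], _ => []
  | (w, c) :: rest, m =>
    if c < 3 then (w, 0) :: pvA rest m else (w, m) :: pvA rest (m + 1)

-- A's fold over fresh, distinct keys appends pvA l m to the accumulator's items.
theorem pvA_fold (l : List (String × Int)) :
    ∀ (d : PySem.Dict String Int) (m : Int),
      (l.map Prod.fst).Nodup → (∀ p ∈ l, d.contains p.1 = false) →
      (l.foldl (fun (st : PySem.Dict String Int × Int) p =>
          if p.2 < 3 then (st.1.insert p.1 0, st.2)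
          else (st.1.insert p.1 st.2, st.2 + 1)) (d, m)).1.items
        = d.items ++ pvA l m := by
  induction l with
  | nil => intro d m _ _; simp [pvA]
  | cons hd tl ih =>
    intro d m hnd hfresh
    obtain ⟨w, c⟩ := hd
    simp only [List.map_cons, List.nodup_cons] at hnd
    have hfw : d.contains w = false := hfresh (w, c) (by simp)
    have hfresh' : ∀ v : Int, ∀ p ∈ tl, (d.insert w v).contains p.1 = false := by
      intro v p hp
      have hne : p.1 ≠ w := by
        intro h; exact hnd.1 (h ▸ (List.mem_map_of_mem hp))
      simp [PySem.Dict.contains_insert, hne, hfresh p (List.mem_cons_of_mem _ hp)]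
    by_cases hc : c < 3
    · simp only [List.foldl_cons, hc, if_pos, pvA]
      rw [ih _ _ hnd.2 (hfresh' 0),
        PySem.Dict.items_insert_of_not_contains _ _ hfw]
      simp
    · simp only [List.foldl_cons, if_neg hc, pvA]
      rw [ih _ _ hnd.2 (hfresh' m),
        PySem.Dict.items_insert_of_not_contains _ _ hfw]
      simp

-- pvA as a positional map over the items list
theorem pvA_char (l : List (String × Int)) :
    ∀ (m : Int), (l.map Prod.fst).Nodup →
      pvA l m = l.map (fun p => if p.2 < 3 then (p.1, 0) else
        (p.1, m + ((((l.filter (fun q => 3 ≤ q.2)).map (fun q => q.1)).idxOf p.1 : Nat) : Int))) := by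
  induction l with
  | nil => intro m _; simp [pvA]
  | cons hd tl ih =>
    intro m hnd
    obtain ⟨w, c⟩ := hd
    simp only [List.map_cons, List.nodup_cons] at hnd
    by_cases hc : c < 3
    · have hfilter : ((w, c) :: tl).filter (fun q => 3 ≤ q.2) = tl.filter (fun q => 3 ≤ q.2) := by
        simp [show ¬(3:Int) ≤ c from by omega]
      rw [List.map_cons, hfilter, ← ih m hnd.2]
      simp [pvA, hc]
    · have hfilter : ((w, c) :: tl).filter (fun q => 3 ≤ q.2)
          = (w, c) :: tl.filter (fun q => 3 ≤ q.2) := by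
        simp [show (3:Int) ≤ c from by omega]
      rw [List.map_cons, hfilter, List.map_cons]
      simp only [pvA, if_neg hc]
      congr 1
      · simp [List.idxOf_cons_self]
      · rw [ih (m + 1) hnd.2]
        apply List.map_congr_left
        intro p hp
        by_cases hp3 : p.2 < 3
        · simp [hp3]
        · have hne : p.1 ≠ w := fun h => hnd.1 (h ▸ List.mem_map_of_mem hp)
          have hwq : (w == p.1) = false := beq_eq_false_iff_ne.2 (Ne.symm hne)
          simp only [if_neg hp3, List.idxOf_cons, hwq, cond_false]
          congr 1
          push_cast
          ring

-- replicate (m+1) w inside l puts w at some index ≥ m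
theorem pvRepIdx (w : String) (l : List String) :
    ∀ (m : Nat), (List.replicate (m + 1) w).Sublist l →
      ∃ k, m ≤ k ∧ ∃ hk : k < l.length, l[k] = w := by
  induction l with
  | nil => intro m h; simp [List.replicate_succ] at h
  | cons x t ih =>
    intro m h
    rw [List.replicate_succ, List.sublist_cons_iff] at h
    rcases h with h | ⟨r, hr, hrt⟩
    · obtain ⟨k, hmk, hk, hval⟩ := ih m (by rw [List.replicate_succ]; exact h)
      exact ⟨k + 1, by omega, by simpa using hk, by simpa using hval⟩
    · obtain ⟨hx, hrep⟩ : x = w ∧ r = List.replicate m w := by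
        have := hr; rw [List.cons_eq_cons] at this; exact ⟨this.1.symm, this.2.symm⟩
      subst hx hrep
      cases m with
      | zero => exact ⟨0, le_refl _, by simp, by simp⟩
      | succ m' =>
        obtain ⟨k, hmk, hk, hval⟩ := ih m' hrt
        exact ⟨k + 1, by omega, by simpa using hk, by simpa using hval⟩

-- three copies of w inside l give a small and a large index two apart
theorem pvRep3 (w : String) (l : List String) :
    (List.replicate 3 w).Sublist l →
      ∃ j k, j + 2 ≤ k ∧ ∃ (hj : j < l.length) (hk : k < l.length), l[j] = w ∧ l[k] = w := by
  induction l with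
  | nil => intro h; simp [show List.replicate 3 w = [w, w, w] from rfl] at h
  | cons x t ih =>
    intro h
    rw [show List.replicate 3 w = w :: List.replicate 2 w from rfl,
      List.sublist_cons_iff] at h
    rcases h with h | ⟨r, hr, hrt⟩
    · obtain ⟨j, k, hjk, hj, hk, hvj, hvk⟩ :=
        ih (by rw [show List.replicate 3 w = w :: List.replicate 2 w from rfl]; exact h)
      exact ⟨j + 1, k + 1, by omega, by simpa using hj, by simpa using hk,
        by simpa using hvj, by simpa using hvk⟩
    · obtain ⟨hx, hrep⟩ : x = w ∧ r = List.replicate 2 w := by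
        have := hr; rw [List.cons_eq_cons] at this; exact ⟨this.1.symm, this.2.symm⟩
      subst hx hrep
      obtain ⟨k, hmk, hk, hval⟩ := pvRepIdx x t 1 hrt
      exact ⟨0, k + 1, by omega, by simp, by simpa using hk, by simp,
        by simpa using hval⟩

-- the offset test on the sorted list is exactly "count ≥ 3"
theorem pv_big_iff (words : List String) (w : String) :
    (w ∈ ((PySem.List.pyRange 0 (((PySem.List.sorted words (fun x => x) false).length : Int) - 2) 1).filter
        (fun i => PySem.List.pyGetD (PySem.List.sorted words (fun x => x) false) i ""
          == PySem.List.pyGetD (PySem.List.sorted words (fun x => x) false) (i + 2) "")).map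
      (fun i => PySem.List.pyGetD (PySem.List.sorted words (fun x => x) false) i ""))
      ↔ 3 ≤ words.count w := by
  set ws := PySem.List.sorted words (fun x => x) false with hws
  have hcnt : ws.count w = words.count w := (PySem.List.sorted_perm words _ false).count_eq w
  rw [← hcnt]
  constructor
  · rintro hmem
    obtain ⟨i, hif, hiv⟩ := List.mem_map.1 hmem
    obtain ⟨hir, hic⟩ := List.mem_filter.1 hif
    obtain ⟨hi0, hi2⟩ := PySem.List.mem_pyRange_one.1 hir
    have hjlen : i.toNat + 2 < ws.length := by omega
    have ht2 : (i + 2).toNat = i.toNat + 2 := by omega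
    rw [PySem.List.pyGetD_eq_getElem ws "" hi0 (by omega)] at hiv hic
    rw [PySem.List.pyGetD_eq_getElem ws "" (by omega) (by omega)] at hic
    simp only [ht2] at hic
    have hceq : ws[i.toNat]'(by omega) = ws[i.toNat + 2] :=
      eq_of_beq (by simpa using hic)
    have h1 : ws[i.toNat]'(by omega) ≤ ws[i.toNat + 1]'(by omega) :=
      PySem.List.sorted_id_getElem_mono words (by omega) (by rw [← hws]; omega)
    have h2 : ws[i.toNat + 1]'(by omega) ≤ ws[i.toNat + 2]'(by omega) :=
      PySem.List.sorted_id_getElem_mono words (by omega) (by rw [← hws]; omega)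
    rw [hiv] at h1
    rw [← hceq, hiv] at h2
    have hm1 : ws[i.toNat + 1]'(by omega) = w := le_antisymm h2 h1
    rw [← List.replicate_sublist_iff]
    have hsub : List.take 3 (List.drop i.toNat ws) = List.replicate 3 w := by
      apply List.ext_getElem
      · simp; omega
      · intro k hk1 hk2
        have hk3 : k < 3 := by simpa using hk2
        rw [List.getElem_take, List.getElem_drop, List.getElem_replicate]
        interval_cases k
        · simpa using hiv
        · simpa using hm1
        · rw [← hceq]; exact hiv
    rw [← hsub]
    exact (List.take_sublist _ _).trans (List.drop_sublist _ _)
  · intro hc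
    obtain ⟨j, k, hjk, hj, hk, hvj, hvk⟩ := pvRep3 w ws (List.replicate_sublist_iff.2 hc)
    have h1 : ws[j]'(by omega) ≤ ws[j + 2]'(by omega) :=
      PySem.List.sorted_id_getElem_mono words (by omega) (by rw [← hws]; omega)
    have h2 : ws[j + 2]'(by omega) ≤ ws[k]'(by omega) :=
      PySem.List.sorted_id_getElem_mono words (by omega) (by rw [← hws]; omega)
    rw [hvj] at h1
    rw [hvk] at h2
    have hj2 : ws[j + 2]'(by omega) = w := le_antisymm h2 h1
    apply List.mem_map.2
    have ht2 : ((j : Int) + 2).toNat = j + 2 := by omega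
    refine ⟨(j : Int), List.mem_filter.2 ⟨PySem.List.mem_pyRange_one.2 ⟨by omega, by omega⟩, ?_⟩, ?_⟩
    · rw [PySem.List.pyGetD_eq_getElem ws "" (by omega) (by omega),
        PySem.List.pyGetD_eq_getElem ws "" (by omega) (by omega)]
      simp only [ht2, Int.toNat_natCast]
      rw [hvj, hj2]
      simp
    · rw [PySem.List.pyGetD_eq_getElem ws "" (by omega) (by omega)]
      simp only [Int.toNat_natCast]
      exact hvj

-- the rank table built from enumerate, read back with a default
theorem pvRank (w : String) (l : List String) :
    ∀ (d : PySem.Dict String Int) (s : Int), l.Nodup →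
      ((PySem.List.enumerate l s).foldl
          (fun (d : PySem.Dict String Int) p => d.insert p.2 (p.1 + 1)) d).getD w 0
        = if w ∈ l then s + (l.idxOf w : Int) + 1 else d.getD w 0 := by
  induction l with
  | nil => intro d s _; simp [PySem.List.enumerate_nil]
  | cons x t ih =>
    intro d s hnd
    simp only [List.nodup_cons] at hnd
    rw [PySem.List.enumerate_cons, List.foldl_cons, ih _ (s + 1) hnd.2]
    by_cases hwt : w ∈ t
    · have hxw : x ≠ w := fun h => hnd.1 (h ▸ hwt)
      have hb : (x == w) = false := beq_eq_false_iff_ne.2 hxw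
      simp only [hwt, if_pos, List.mem_cons, or_true, List.idxOf_cons, hb, cond_false]
      push_cast; ring
    · by_cases hxw : x = w
      · subst hxw
        simp [hwt, List.idxOf_cons_self]
      · simp [PySem.Dict.getD_insert, hwt, Ne.symm hxw]

-- ===== VERDICT (by name: the statement is the Claim_ definition above) =====
theorem make_word_idx_spec : Claim_equal_make_word_idx := by
  intro item_names _
  unfold Spec_make_word_idx
  simp only [make_word_idx, make_word_idx_alt]
  set words := item_names.map (fun word => PySem.Str.lower word) with hwords
  set l := (PySem.Dict.counter words).items with hl
  have hnd : (l.map Prod.fst).Nodup := by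
    have hkeys : l.map Prod.fst = (PySem.Dict.counter words).keys := rfl
    rw [hkeys]; exact PySem.Dict.nodup_keys_counter words
  -- A side
  rw [pvA_fold l PySem.Dict.empty 1 hnd (fun p _ => PySem.Dict.contains_empty p.1),
    pvA_char l 1 hnd]
  -- B side
  set ws := PySem.List.sorted words (fun x => x) false with hws
  set big := PySem.Set.ofList
    (((PySem.List.pyRange 0 ((ws.length : Int) - 2) 1).filter
        (fun i => PySem.List.pyGetD ws i "" == PySem.List.pyGetD ws (i + 2) "")).map
      (fun i => PySem.List.pyGetD ws i "")) with hbig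
  set distinct := PySem.List.dedup words with hdist
  have hdnd : distinct.Nodup := PySem.List.nodup_dedup words
  set freq := distinct.filter (fun w => PySem.Set.contains big w) with hfreq
  set rank := (PySem.List.enumerate freq 0).foldl
    (fun (d : PySem.Dict String Int) p => d.insert p.2 (p.1 + 1)) PySem.Dict.empty with hrank
  have hcont : ∀ w, PySem.Set.contains big w = true ↔ 3 ≤ words.count w := by
    intro w
    have h1 : PySem.Set.contains big w = true ↔ w ∈ big := by
      unfold PySem.Set.contains; exact List.contains_iff_mem
    rw [h1, hbig, PySem.Set.mem_ofList]
    exact pv_big_iff words w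
  have hB := PySem.Dict.items_foldl_insert_fresh distinct (fun w => w)
      (fun w => rank.getD w 0)
      PySem.Dict.empty (fun a _ => PySem.Dict.contains_empty a)
      (by simpa using hdnd)
  rw [hB]
  -- counter items as a map over distinct
  have hitems : l = distinct.map (fun k => (k, (words.count k : Int))) := by
    rw [hl, PySem.Dict.items_counter, hdist, PySem.List.dedup_eq_ofList]
  -- the frequent list of A equals freq
  have hfr : (l.filter (fun q => 3 ≤ q.2)).map (fun q => q.1) = freq := by
    rw [hitems, List.filter_map, List.map_map]
    simp only [Function.comp_def]
    rw [List.map_id', hfreq]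
    apply List.filter_congr
    intro w _
    have hcast : ((3:Int) ≤ (words.count w : Int)) ↔ 3 ≤ words.count w := by
      exact_mod_cast Iff.rfl
    by_cases h3 : 3 ≤ words.count w
    · rw [(hcont w).2 h3]
      simp only [decide_eq_true_eq, hcast]
      exact h3
    · have hcf : PySem.Set.contains big w = false := by
        cases hcf : PySem.Set.contains big w
        · rfl
        · exact absurd ((hcont w).1 hcf) h3
      rw [hcf]
      simp only [decide_eq_false_iff_not, hcast]
      exact h3
  have hfnd : freq.Nodup := hdnd.filter _
  rw [hfr, hitems, List.map_map]
  simp only [show PySem.Dict.empty.items = ([] : List (String × Int)) from rfl, List.nil_append]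
  apply List.map_congr_left
  intro w hw
  have hmemfreq : w ∈ freq ↔ 3 ≤ words.count w := by
    rw [hfreq]
    constructor
    · intro h; exact (hcont w).1 (List.mem_filter.1 h).2
    · intro h; exact List.mem_filter.2 ⟨hw, (hcont w).2 h⟩
  have hrw : rank.getD w 0 = if w ∈ freq then 0 + (freq.idxOf w : Int) + 1
      else PySem.Dict.empty.getD w 0 := by
    rw [hrank]; exact pvRank w freq PySem.Dict.empty 0 hfnd
  by_cases hc : (words.count w : Int) < 3
  · have hnm : w ∉ freq := fun h => absurd (hmemfreq.1 h) (by omega)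
    simp [Function.comp, hc, hrw, hnm, PySem.Dict.getD_empty]
  · have hm : w ∈ freq := hmemfreq.2 (by omega)
    simp only [Function.comp, if_neg hc, hrw, hm, if_pos]
    exact Prod.ext rfl (by omega)
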